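-- pv_equiv track=rewrite | github.com/nusuy/2024-Problem-Solving | 2024/d241022/boj_12933-오리.py | solution
-- ===== SOURCE A (Python) =====
-- def solution(S):
--     answer = 0
--     duck = 'quack'
--     arr = [0 for _ in range(len(S) // 5)]
--
--     def check_arr(idx):
--         for i in range(len(arr)):
--             if arr[i] % 5 == idx:
--                 arr[i] += 1
--                 return True
--         return False
--
--     for c in S:
--         for i, v in enumerate(duck):
--             if c == v:
--                 if not check_arr(i):
--                     return -1
--                 break
--
--     for a in arr:
--         if a != 0:
--             if a % 5 == 0:
--                 answer += 1
--             else: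
--                 return -1
--     if answer == 0:
--         return -1
--     else:
--         return answer
-- ===== SOURCE B (Python) =====
-- def solution(S):
--     # Single pass: count ducks in each of the 5 quack-progress states.
--     c0 = c1 = c2 = c3 = c4 = 0
--     ducks = 0
--     for ch in S:
--         if ch == 'q':
--             if c0 > 0:
--                 c0 -= 1
--             else:
--                 ducks += 1
--             c1 += 1
--         elif ch == 'u':
--             if c1 == 0:
--                 return -1
--             c1 -= 1
--             c2 += 1
--         elif ch == 'a':
--             if c2 == 0:
--                 return -1
--             c2 -= 1
--             c3 += 1
--         elif ch == 'c':
--             if c3 == 0: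
--                 return -1
--             c3 -= 1
--             c4 += 1
--         elif ch == 'k':
--             if c4 == 0:
--                 return -1
--             c4 -= 1
--             c0 += 1
--     if ducks == 0 or c1 + c2 + c3 + c4 > 0:
--         return -1
--     return ducks
-- ===== Notes on version B (the rewrite author's own statement) =====
-- stated objective: faster
-- what changed: A rescans its per-duck progress array (one slot per potential duck) on every character; B makes a single pass keeping only five counters of how many ducks are waiting at each progress state plus the number of ducks started, so the inner scan disappears.
import Mathlib
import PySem

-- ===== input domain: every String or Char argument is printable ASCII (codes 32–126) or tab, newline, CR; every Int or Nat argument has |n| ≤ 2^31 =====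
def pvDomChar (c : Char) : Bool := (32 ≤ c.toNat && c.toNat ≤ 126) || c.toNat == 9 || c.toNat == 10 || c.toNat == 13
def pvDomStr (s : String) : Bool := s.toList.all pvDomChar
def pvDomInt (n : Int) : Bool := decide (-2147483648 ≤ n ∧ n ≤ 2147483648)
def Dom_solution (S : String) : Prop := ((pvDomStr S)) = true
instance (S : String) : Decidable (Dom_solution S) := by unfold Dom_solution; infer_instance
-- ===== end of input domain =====

-- B replaces A's quadratic per-character scan of a duck array by a single pass
-- maintaining the five counts of ducks in each 'quack' progress state (same return value).

-- ===== PORT A =====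

-- inner loop: `for i, v in enumerate(duck): if c == v: … break` — first matching index
def innerFind (c : Char) : List (Int × Char) → Option Int
  | [] => none
  | (i, v) :: rest => if c = v then some i else innerFind c rest

-- `check_arr(idx)`: scan arr left to right, bump the first entry with arr[i] % 5 == idx
def checkArr (idx : Int) : List Int → Option (List Int)
  | [] => none
  | a :: rest =>
    if PySem.Int.mod a 5 = idx then some ((a + 1) :: rest)
    else (checkArr idx rest).map (a :: ·)

-- the main `for c in S` loop; `none` = the `return -1` inside the loop
def loopA : List Char → List Int → Option (List Int)
  | [], arr => some arr
  | c :: cs, arr =>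
    match innerFind c (PySem.List.enumerate "quack".toList 0) with
    | none => loopA cs arr
    | some i =>
      match checkArr i arr with
      | none => none
      | some arr' => loopA cs arr'

-- the final `for a in arr` loop with accumulator `answer`
def tallyA : List Int → Int → Option Int
  | [], answer => some answer
  | a :: rest, answer =>
    if a ≠ 0 then
      (if PySem.Int.mod a 5 = 0 then tallyA rest (answer + 1) else none)
    else tallyA rest answer

def solution (S : String) : Int :=
  let arr := (PySem.List.pyRange 0 (PySem.Int.floordiv (PySem.Str.len S) 5) 1).map (fun _ => (0 : Int))
  match loopA S.toList arr with
  | none => -1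
  | some arr' =>
    match tallyA arr' 0 with
    | none => -1
    | some answer => if answer = 0 then -1 else answer

-- ===== PORT B =====

-- single pass; state = (ducks waiting after 'q','u','a','c','k' resp., ducks created)
def loopB : List Char → Int → Int → Int → Int → Int → Int → Option (Int × Int × Int × Int × Int × Int)
  | [], c0, c1, c2, c3, c4, d => some (c0, c1, c2, c3, c4, d)
  | ch :: cs, c0, c1, c2, c3, c4, d =>
    if ch = 'q' then
      (if c0 > 0 then loopB cs (c0 - 1) (c1 + 1) c2 c3 c4 d
       else loopB cs c0 (c1 + 1) c2 c3 c4 (d + 1))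
    else if ch = 'u' then
      (if c1 = 0 then none else loopB cs c0 (c1 - 1) (c2 + 1) c3 c4 d)
    else if ch = 'a' then
      (if c2 = 0 then none else loopB cs c0 c1 (c2 - 1) (c3 + 1) c4 d)
    else if ch = 'c' then
      (if c3 = 0 then none else loopB cs c0 c1 c2 (c3 - 1) (c4 + 1) d)
    else if ch = 'k' then
      (if c4 = 0 then none else loopB cs (c0 + 1) c1 c2 c3 (c4 - 1) d)
    else loopB cs c0 c1 c2 c3 c4 d

def solution_alt (S : String) : Int :=
  match loopB S.toList 0 0 0 0 0 0 with
  | none => -1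
  | some (_, c1, c2, c3, c4, d) =>
    if d = 0 ∨ c1 + c2 + c3 + c4 > 0 then -1 else d

-- ===== PRECONDITION & SPEC =====
def Spec_solution (S : String) (out : Int) : Prop := out = solution_alt S
instance (S : String) (out : Int) : Decidable (Spec_solution S out) := by unfold Spec_solution; infer_instance

-- ===== CLAIM (what is proved, stated in full; the proofs are below) =====
def Claim_equal_solution : Prop := ∀ (S : String), Dom_solution S → Spec_solution S (solution S)

-- ===== LEMMAS AND PROOFS =====

-- number of arr entries that are a nonzero duck currently in state i (progress ≡ i mod 5)
def cntN (i : Int) (l : List Int) : Nat := l.countP (fun a => a % 5 == i && a != 0)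

-- A's pipeline from the middle of the main loop
def runA (cs : List Char) (arr : List Int) : Int :=
  match loopA cs arr with
  | none => -1
  | some arr' =>
    match tallyA arr' 0 with
    | none => -1
    | some answer => if answer = 0 then -1 else answer

-- B's pipeline from the middle of the loop
def runB (cs : List Char) (c0 c1 c2 c3 c4 d : Int) : Int :=
  match loopB cs c0 c1 c2 c3 c4 d with
  | none => -1
  | some (_, r1, r2, r3, r4, rd) =>
    if rd = 0 ∨ r1 + r2 + r3 + r4 > 0 then -1 else rd

lemma checkArr_cons (idx a : Int) (l : List Int) :
    checkArr idx (a :: l) =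
      if a % 5 = idx then some ((a + 1) :: l) else (checkArr idx l).map (a :: ·) := by
  simp [checkArr]

lemma tallyA_cons (a : Int) (l : List Int) (ans : Int) :
    tallyA (a :: l) ans =
      if a ≠ 0 then (if a % 5 = 0 then tallyA l (ans + 1) else none) else tallyA l ans := by
  simp [tallyA]

lemma cntN_cons (i a : Int) (l : List Int) :
    cntN i (a :: l) = cntN i l + (if a % 5 = i ∧ a ≠ 0 then 1 else 0) := by
  simp only [cntN, List.countP_cons]
  congr 1
  by_cases h1 : a % 5 = i <;> by_cases h2 : a = 0 <;> simp [h1, h2]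

lemma cntN_append (i : Int) (p q : List Int) : cntN i (p ++ q) = cntN i p + cntN i q := by
  simp [cntN, List.countP_append]

lemma emod5_cases (a : Int) : a % 5 = 0 ∨ a % 5 = 1 ∨ a % 5 = 2 ∨ a % 5 = 3 ∨ a % 5 = 4 := by
  omega

-- checkArr finds no entry when nothing matches
lemma checkArr_none (idx : Int) (l : List Int) (h : ∀ a ∈ l, a % 5 ≠ idx) :
    checkArr idx l = none := by
  induction l with
  | nil => rfl
  | cons a rest ih =>
    rw [checkArr_cons, if_neg (h a (by simp))]
    rw [ih (fun b hb => h b (by simp [hb]))]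
    rfl

-- checkArr bumps the first matching entry
lemma checkArr_first (idx a : Int) (l r : List Int)
    (hl : ∀ b ∈ l, b % 5 ≠ idx) (ha : a % 5 = idx) :
    checkArr idx (l ++ a :: r) = some (l ++ (a + 1) :: r) := by
  induction l with
  | nil => simp [checkArr_cons, ha]
  | cons b rest ih =>
    rw [List.cons_append, checkArr_cons, if_neg (hl b (by simp))]
    rw [ih (fun x hx => hl x (by simp [hx]))]
    rfl

-- first-match decomposition of a list with a positive count
lemma exists_first_match (P : Int → Bool) (p : List Int) (h : p.countP P ≠ 0) :
    ∃ l a r, p = l ++ a :: r ∧ (∀ b ∈ l, P b = false) ∧ P a = true := by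
  induction p with
  | nil => simp [List.countP_nil] at h
  | cons a rest ih =>
    by_cases hPa : P a = true
    · exact ⟨[], a, rest, by simp, by simp, hPa⟩
    · rw [List.countP_cons, if_neg (by simp [hPa])] at h
      obtain ⟨l, x, r, hdec, hnol, hx⟩ := ih (by simpa using h)
      refine ⟨a :: l, x, r, by simp [hdec], ?_, hx⟩
      intro b hb
      rcases List.mem_cons.mp hb with hb | hb
      · subst hb; simpa using hPa
      · exact hnol b hb

-- a zero count means no positive entry is in that state
lemma no_match_of_cnt_zero (idx : Int) (p : List Int) (hpos : ∀ a ∈ p, 0 < a)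
    (h0 : cntN idx p = 0) : ∀ a ∈ p, a % 5 ≠ idx := by
  intro a ha hmod
  have hfa := List.countP_eq_zero.mp h0 a ha
  have hap := hpos a ha
  simp [hmod] at hfa
  omega

-- the five state counts of positive entries partition the list
lemma cnt_partition (p : List Int) (hpos : ∀ a ∈ p, 0 < a) :
    cntN 0 p + cntN 1 p + cntN 2 p + cntN 3 p + cntN 4 p = p.length := by
  induction p with
  | nil => simp [cntN]
  | cons a rest ih =>
    have hpos' : ∀ b ∈ rest, 0 < b := fun b hb => hpos b (by simp [hb])
    have ha : (0:Int) < a := hpos a (by simp)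
    have ihr := ih hpos'
    have hne : a ≠ 0 := by omega
    simp only [cntN_cons, List.length_cons]
    rcases emod5_cases a with h5 | h5 | h5 | h5 | h5 <;> simp [h5, hne] <;> omega

-- tallyA on a block of positive entries
lemma tallyA_pos : ∀ (p : List Int), (∀ a ∈ p, 0 < a) → ∀ (ans : Int),
    tallyA p ans =
      if cntN 1 p + cntN 2 p + cntN 3 p + cntN 4 p = 0 then some (ans + cntN 0 p) else none := by
  intro p
  induction p with
  | nil => intro _ ans; simp [tallyA, cntN]
  | cons a rest ih =>
    intro hpos ans
    have hpos' : ∀ b ∈ rest, 0 < b := fun b hb => hpos b (by simp [hb])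
    have ha : (0:Int) < a := hpos a (by simp)
    have hne : a ≠ 0 := by omega
    rw [tallyA_cons, if_pos hne]
    rcases emod5_cases a with h5 | h5 | h5 | h5 | h5
    · rw [if_pos h5, ih hpos' (ans + 1)]
      have e0 : cntN 0 (a :: rest) = cntN 0 rest + 1 := by rw [cntN_cons]; simp [h5, hne]
      have e1 : cntN 1 (a :: rest) = cntN 1 rest := by rw [cntN_cons]; simp [h5]
      have e2 : cntN 2 (a :: rest) = cntN 2 rest := by rw [cntN_cons]; simp [h5]
      have e3 : cntN 3 (a :: rest) = cntN 3 rest := by rw [cntN_cons]; simp [h5]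
      have e4 : cntN 4 (a :: rest) = cntN 4 rest := by rw [cntN_cons]; simp [h5]
      rw [e0, e1, e2, e3, e4]
      split_ifs
      · congr 1; push_cast; ring
      · rfl
    · rw [if_neg (by omega)]
      have e : cntN 1 (a :: rest) = cntN 1 rest + 1 := by rw [cntN_cons]; simp [h5, hne]
      rw [if_neg (by simp only [e]; omega)]
    · rw [if_neg (by omega)]
      have e : cntN 2 (a :: rest) = cntN 2 rest + 1 := by rw [cntN_cons]; simp [h5, hne]
      rw [if_neg (by simp only [e]; omega)]
    · rw [if_neg (by omega)]
      have e : cntN 3 (a :: rest) = cntN 3 rest + 1 := by rw [cntN_cons]; simp [h5, hne]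
      rw [if_neg (by simp only [e]; omega)]
    · rw [if_neg (by omega)]
      have e : cntN 4 (a :: rest) = cntN 4 rest + 1 := by rw [cntN_cons]; simp [h5, hne]
      rw [if_neg (by simp only [e]; omega)]

-- tallyA skips zeros
lemma tallyA_zeros (m : Nat) (ans : Int) : tallyA (List.replicate m 0) ans = some ans := by
  induction m with
  | zero => rfl
  | succ k ih => simpa [tallyA_cons] using ih

lemma tallyA_append (p q : List Int) (ans : Int) :
    tallyA (p ++ q) ans =
      match tallyA p ans with
      | none => none
      | some r => tallyA q r := by
  induction p generalizing ans with
  | nil => simp [tallyA]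
  | cons a rest ih =>
    rw [List.cons_append, tallyA_cons, tallyA_cons]
    split
    · split
      · rw [ih]
      · rfl
    · rw [ih]

-- soundness bounds for B's loop: nonnegativity, weight bound, monotone duck count,
-- and conservation of (created − alive)
lemma loopB_sound : ∀ (cs : List Char) (c0 c1 c2 c3 c4 d r0 r1 r2 r3 r4 rd : Int),
    loopB cs c0 c1 c2 c3 c4 d = some (r0, r1, r2, r3, r4, rd) →
    0 ≤ c0 → 0 ≤ c1 → 0 ≤ c2 → 0 ≤ c3 → 0 ≤ c4 →
    (0 ≤ r0 ∧ 0 ≤ r1 ∧ 0 ≤ r2 ∧ 0 ≤ r3 ∧ 0 ≤ r4) ∧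
    5*r0 + r1 + 2*r2 + 3*r3 + 4*r4 ≤ 5*c0 + c1 + 2*c2 + 3*c3 + 4*c4 + cs.length ∧
    d ≤ rd ∧ rd - (r0 + r1 + r2 + r3 + r4) = d - (c0 + c1 + c2 + c3 + c4) := by
  intro cs
  induction cs with
  | nil =>
    intro c0 c1 c2 c3 c4 d r0 r1 r2 r3 r4 rd h h0 h1 h2 h3 h4
    simp [loopB] at h
    obtain ⟨e0, e1, e2, e3, e4, ed⟩ := h
    subst e0; subst e1; subst e2; subst e3; subst e4; subst ed
    refine ⟨⟨h0, h1, h2, h3, h4⟩, by simp, by omega, by omega⟩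
  | cons ch cs ih =>
    intro c0 c1 c2 c3 c4 d r0 r1 r2 r3 r4 rd h h0 h1 h2 h3 h4
    simp only [loopB] at h
    split_ifs at h with hq hgt hu hz1 ha hz2 hc hz3 hk hz4
    · have := ih _ _ _ _ _ _ _ _ _ _ _ _ h (by omega) (by omega) h2 h3 h4
      simp only [List.length_cons]; push_cast; omega
    · have := ih _ _ _ _ _ _ _ _ _ _ _ _ h h0 (by omega) h2 h3 h4
      simp only [List.length_cons]; push_cast; omega
    · have := ih _ _ _ _ _ _ _ _ _ _ _ _ h h0 (by omega) (by omega) h3 h4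
      simp only [List.length_cons]; push_cast; omega
    · have := ih _ _ _ _ _ _ _ _ _ _ _ _ h h0 h1 (by omega) (by omega) h4
      simp only [List.length_cons]; push_cast; omega
    · have := ih _ _ _ _ _ _ _ _ _ _ _ _ h h0 h1 h2 (by omega) (by omega)
      simp only [List.length_cons]; push_cast; omega
    · have := ih _ _ _ _ _ _ _ _ _ _ _ _ h (by omega) h1 h2 h3 (by omega)
      simp only [List.length_cons]; push_cast; omega
    · have := ih _ _ _ _ _ _ _ _ _ _ _ _ h h0 h1 h2 h3 h4
      simp only [List.length_cons]; push_cast; omega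

lemma runA_step (ch : Char) (cs : List Char) (arr : List Int) :
    runA (ch :: cs) arr =
      if ch = 'q' then (match checkArr 0 arr with | none => -1 | some arr' => runA cs arr')
      else if ch = 'u' then (match checkArr 1 arr with | none => -1 | some arr' => runA cs arr')
      else if ch = 'a' then (match checkArr 2 arr with | none => -1 | some arr' => runA cs arr')
      else if ch = 'c' then (match checkArr 3 arr with | none => -1 | some arr' => runA cs arr')
      else if ch = 'k' then (match checkArr 4 arr with | none => -1 | some arr' => runA cs arr')
      else runA cs arr := by
  by_cases h1 : ch = 'q'
  · subst h1
    have hf : innerFind 'q' [((0:Int),'q'),(1,'u'),(2,'a'),(3,'c'),(4,'k')] = some 0 := by decide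
    rcases hc : checkArr 0 arr with _ | arr' <;> simp [runA, loopA, hf, hc]
  by_cases h2 : ch = 'u'
  · subst h2
    have hf : innerFind 'u' [((0:Int),'q'),(1,'u'),(2,'a'),(3,'c'),(4,'k')] = some 1 := by decide
    rcases hc : checkArr 1 arr with _ | arr' <;> simp [runA, loopA, hf, hc]
  by_cases h3 : ch = 'a'
  · subst h3
    have hf : innerFind 'a' [((0:Int),'q'),(1,'u'),(2,'a'),(3,'c'),(4,'k')] = some 2 := by decide
    rcases hc : checkArr 2 arr with _ | arr' <;> simp [runA, loopA, hf, hc]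
  by_cases h4 : ch = 'c'
  · subst h4
    have hf : innerFind 'c' [((0:Int),'q'),(1,'u'),(2,'a'),(3,'c'),(4,'k')] = some 3 := by decide
    rcases hc : checkArr 3 arr with _ | arr' <;> simp [runA, loopA, hf, hc]
  by_cases h5 : ch = 'k'
  · subst h5
    have hf : innerFind 'k' [((0:Int),'q'),(1,'u'),(2,'a'),(3,'c'),(4,'k')] = some 4 := by decide
    rcases hc : checkArr 4 arr with _ | arr' <;> simp [runA, loopA, hf, hc]
  have hf : innerFind ch [((0:Int),'q'),(1,'u'),(2,'a'),(3,'c'),(4,'k')] = none := by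
    simp [innerFind, h1, h2, h3, h4, h5]
  simp [runA, loopA, hf, h1, h2, h3, h4, h5]

lemma runB_cons (ch : Char) (cs : List Char) (c0 c1 c2 c3 c4 d : Int) :
    runB (ch :: cs) c0 c1 c2 c3 c4 d =
      if ch = 'q' then
        (if c0 > 0 then runB cs (c0 - 1) (c1 + 1) c2 c3 c4 d
         else runB cs c0 (c1 + 1) c2 c3 c4 (d + 1))
      else if ch = 'u' then (if c1 = 0 then -1 else runB cs c0 (c1 - 1) (c2 + 1) c3 c4 d)
      else if ch = 'a' then (if c2 = 0 then -1 else runB cs c0 c1 (c2 - 1) (c3 + 1) c4 d)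
      else if ch = 'c' then (if c3 = 0 then -1 else runB cs c0 c1 c2 (c3 - 1) (c4 + 1) d)
      else if ch = 'k' then (if c4 = 0 then -1 else runB cs (c0 + 1) c1 c2 c3 (c4 - 1) d)
      else runB cs c0 c1 c2 c3 c4 d := by
  simp only [runB, loopB]
  split_ifs <;> rfl

-- the final tally, phrased on the split state
lemma runA_nil (p : List Int) (m : Nat) (hpos : ∀ a ∈ p, 0 < a) :
    runA [] (p ++ List.replicate m 0) =
      if cntN 1 p + cntN 2 p + cntN 3 p + cntN 4 p = 0 then
        (if cntN 0 p = 0 then -1 else (cntN 0 p : Int)) else -1 := by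
  simp only [runA, loopA]
  rw [tallyA_append, tallyA_pos p hpos 0]
  by_cases hmid : cntN 1 p + cntN 2 p + cntN 3 p + cntN 4 p = 0
  · rw [if_pos hmid, if_pos hmid]
    simp [tallyA_zeros]
  · rw [if_neg hmid, if_neg hmid]

lemma runB_nil (c0 c1 c2 c3 c4 d : Int) :
    runB [] c0 c1 c2 c3 c4 d = if d = 0 ∨ c1 + c2 + c3 + c4 > 0 then -1 else d := rfl

-- ===== main bisimulation =====
lemma bisim : ∀ (cs : List Char) (p : List Int) (m : Nat) (t : Int),
    (∀ a ∈ p, 0 < a) →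
    5*(cntN 0 p : Int) + (cntN 1 p) + 2*(cntN 2 p) + 3*(cntN 3 p) + 4*(cntN 4 p) ≤ t →
    t + cs.length < 5 * ((p.length : Int) + m) + 5 →
    runA cs (p ++ List.replicate m 0) =
      runB cs (cntN 0 p) (cntN 1 p) (cntN 2 p) (cntN 3 p) (cntN 4 p) (p.length) := by
  intro cs
  induction cs with
  | nil =>
    intro p m t hpos hW hlen
    have hpart := cnt_partition p hpos
    rw [runA_nil p m hpos, runB_nil]
    split_ifs <;> omega
  | cons ch cs ih =>
    intro p m t hpos hW hlen
    simp only [List.length_cons] at hlen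
    push_cast at hlen
    rw [runA_step, runB_cons]
    by_cases hq : ch = 'q'
    · rw [if_pos hq, if_pos hq]
      by_cases h0 : cntN 0 p = 0
      · -- no duck is waiting for 'q'
        have hno := no_match_of_cnt_zero 0 p hpos h0
        rcases m with _ | m'
        · -- array full of busy ducks: A gives up; B overcommits and must fail later
          have hnone : checkArr 0 (p ++ List.replicate 0 0) = none := by
            simpa using checkArr_none 0 p hno
          rw [hnone, if_neg (by omega)]
          rcases hl : loopB cs (↑(cntN 0 p)) (↑(cntN 1 p) + 1) (↑(cntN 2 p)) (↑(cntN 3 p))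
              (↑(cntN 4 p)) (↑p.length + 1) with _ | ⟨r0, r1, r2, r3, r4, rd⟩
          · simp [runB, hl]
          · obtain ⟨⟨hr0, hr1, hr2, hr3, hr4⟩, hWb, hmono, hcons⟩ :=
              loopB_sound cs _ _ _ _ _ _ _ _ _ _ _ _ hl (by omega) (by omega) (by omega)
                (by omega) (by omega)
            have hpart := cnt_partition p hpos
            simp only [runB, hl]
            rw [if_pos (by by_contra hcon; push Not at hcon; omega)]
        · -- a fresh slot is started
          have hrep : p ++ List.replicate (m' + 1) (0:Int) = p ++ (0:Int) :: List.replicate m' 0 := rfl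
          have hsome : checkArr 0 (p ++ List.replicate (m' + 1) 0)
              = some ((p ++ [1]) ++ List.replicate m' 0) := by
            rw [hrep, checkArr_first 0 0 p (List.replicate m' 0) hno (by norm_num)]
            simp
          rw [hsome, if_neg (by omega)]
          have c0v : cntN 0 [1] = 0 := by decide
          have c1v : cntN 1 [1] = 1 := by decide
          have c2v : cntN 2 [1] = 0 := by decide
          have c3v : cntN 3 [1] = 0 := by decide
          have c4v : cntN 4 [1] = 0 := by decide
          have e0 : cntN 0 (p ++ [1]) = cntN 0 p := by simp [cntN_append, c0v]
          have e1 : cntN 1 (p ++ [1]) = cntN 1 p + 1 := by simp [cntN_append, c1v]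
          have e2 : cntN 2 (p ++ [1]) = cntN 2 p := by simp [cntN_append, c2v]
          have e3 : cntN 3 (p ++ [1]) = cntN 3 p := by simp [cntN_append, c3v]
          have e4 : cntN 4 (p ++ [1]) = cntN 4 p := by simp [cntN_append, c4v]
          have g0 : (↑(cntN 0 p) : Int) = ↑(cntN 0 (p ++ [1])) := by omega
          have g1 : (↑(cntN 1 p) : Int) + 1 = ↑(cntN 1 (p ++ [1])) := by omega
          have g2 : (↑(cntN 2 p) : Int) = ↑(cntN 2 (p ++ [1])) := by omega
          have g3 : (↑(cntN 3 p) : Int) = ↑(cntN 3 (p ++ [1])) := by omega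
          have g4 : (↑(cntN 4 p) : Int) = ↑(cntN 4 (p ++ [1])) := by omega
          have glen : ((p.length : Int)) + 1 = ↑(p ++ [1]).length := by simp
          have hpos' : ∀ b ∈ p ++ [1], 0 < b := by
            intro b hb
            rcases List.mem_append.mp hb with hb | hb
            · exact hpos b hb
            · simp at hb; omega
          have hW' : 5*(cntN 0 (p ++ [1]) : Int) + (cntN 1 (p ++ [1])) + 2*(cntN 2 (p ++ [1]))
              + 3*(cntN 3 (p ++ [1])) + 4*(cntN 4 (p ++ [1])) ≤ t + 1 := by omega
          have hlen' : (t + 1) + ((cs.length : Int)) < 5 * (((p ++ [1]).length : Int) + m') + 5 := by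
            simp only [List.length_append, List.length_cons] at hlen ⊢
            push_cast at hlen ⊢
            omega
          rw [g0, g1, g2, g3, g4, glen]
          exact ih (p ++ [1]) m' (t + 1) hpos' hW' hlen'
      · obtain ⟨l, a, r, hp, hnol, hPa⟩ :=
          exists_first_match (fun b => b % 5 == (0:Int) && b != 0) p (by simpa [cntN] using h0)
        obtain ⟨ha5, hane⟩ : a % 5 = 0 ∧ ¬ a = 0 := by simpa using hPa
        subst hp
        have hapos : 0 < a := hpos a (by simp)
        have hane1 : ¬ a + 1 = 0 := by omega
        have ha1 : (a + 1) % 5 = 1 := by omega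
        have hnol' : ∀ b ∈ l, b % 5 ≠ 0 := by
          intro b hb hbeq
          have hf := hnol b hb
          rw [hbeq] at hf
          simp at hf
          have := hpos b (by simp [hb])
          omega
        have hsome : checkArr 0 ((l ++ a :: r) ++ List.replicate m 0)
            = some ((l ++ (a + 1) :: r) ++ List.replicate m 0) := by
          have h := checkArr_first 0 a l (r ++ List.replicate m 0) hnol' ha5
          simpa [List.append_assoc] using h
        rw [hsome, if_pos (by omega)]
        have e0 : cntN 0 (l ++ (a + 1) :: r) + 1 = cntN 0 (l ++ a :: r) := by
          simp [cntN_append, cntN_cons, ha5, ha1, hane, hane1] <;> omega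
        have e1 : cntN 1 (l ++ (a + 1) :: r) = cntN 1 (l ++ a :: r) + 1 := by
          simp [cntN_append, cntN_cons, ha5, ha1, hane, hane1] <;> omega
        have e2 : cntN 2 (l ++ (a + 1) :: r) = cntN 2 (l ++ a :: r) := by
          simp [cntN_append, cntN_cons, ha5, ha1, hane, hane1] <;> omega
        have e3 : cntN 3 (l ++ (a + 1) :: r) = cntN 3 (l ++ a :: r) := by
          simp [cntN_append, cntN_cons, ha5, ha1, hane, hane1] <;> omega
        have e4 : cntN 4 (l ++ (a + 1) :: r) = cntN 4 (l ++ a :: r) := by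
          simp [cntN_append, cntN_cons, ha5, ha1, hane, hane1] <;> omega
        have g0 : (↑(cntN 0 (l ++ a :: r)) : Int) - 1 = ↑(cntN 0 (l ++ (a + 1) :: r)) := by omega
        have g1 : (↑(cntN 1 (l ++ a :: r)) : Int) + 1 = ↑(cntN 1 (l ++ (a + 1) :: r)) := by omega
        have g2 : (↑(cntN 2 (l ++ a :: r)) : Int) = ↑(cntN 2 (l ++ (a + 1) :: r)) := by omega
        have g3 : (↑(cntN 3 (l ++ a :: r)) : Int) = ↑(cntN 3 (l ++ (a + 1) :: r)) := by omega
        have g4 : (↑(cntN 4 (l ++ a :: r)) : Int) = ↑(cntN 4 (l ++ (a + 1) :: r)) := by omega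
        have glen : ((l ++ a :: r).length : Int) = ↑(l ++ (a + 1) :: r).length := by simp
        have hpos' : ∀ b ∈ l ++ (a + 1) :: r, 0 < b := by
          intro b hb
          rcases List.mem_append.mp hb with hb | hb
          · exact hpos b (List.mem_append_left _ hb)
          rcases List.mem_cons.mp hb with hb | hb
          · omega
          · exact hpos b (List.mem_append_right _ (List.mem_cons_of_mem _ hb))
        have hW' : 5*(cntN 0 (l ++ (a + 1) :: r) : Int) + (cntN 1 (l ++ (a + 1) :: r))
            + 2*(cntN 2 (l ++ (a + 1) :: r)) + 3*(cntN 3 (l ++ (a + 1) :: r))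
            + 4*(cntN 4 (l ++ (a + 1) :: r)) ≤ t + 1 := by omega
        have hlen' : (t + 1) + ((cs.length : Int)) < 5 * (((l ++ (a + 1) :: r).length : Int) + m) + 5 := by
          simp only [List.length_append, List.length_cons] at hlen ⊢
          push_cast at hlen ⊢
          omega
        rw [g0, g1, g2, g3, g4, glen]
        exact ih (l ++ (a + 1) :: r) m (t + 1) hpos' hW' hlen'
    rw [if_neg hq, if_neg hq]
    by_cases hu : ch = 'u'
    · rw [if_pos hu, if_pos hu]
      by_cases h1 : cntN 1 p = 0
      · have hno := no_match_of_cnt_zero 1 p hpos h1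
        have hnone : checkArr 1 (p ++ List.replicate m 0) = none := by
          apply checkArr_none
          intro b hb
          rcases List.mem_append.mp hb with hb | hb
          · exact hno b hb
          · have := List.eq_of_mem_replicate hb; subst this; norm_num
        rw [hnone, if_pos (by omega)]
      · obtain ⟨l, a, r, hp, hnol, hPa⟩ :=
          exists_first_match (fun b => b % 5 == (1:Int) && b != 0) p (by simpa [cntN] using h1)
        obtain ⟨ha5, hane⟩ : a % 5 = 1 ∧ ¬ a = 0 := by simpa using hPa
        subst hp
        have hapos : 0 < a := hpos a (by simp)
        have hane1 : ¬ a + 1 = 0 := by omega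
        have ha1 : (a + 1) % 5 = 2 := by omega
        have hnol' : ∀ b ∈ l, b % 5 ≠ 1 := by
          intro b hb hbeq
          have hf := hnol b hb
          rw [hbeq] at hf
          simp at hf
          have := hpos b (by simp [hb])
          omega
        have hsome : checkArr 1 ((l ++ a :: r) ++ List.replicate m 0)
            = some ((l ++ (a + 1) :: r) ++ List.replicate m 0) := by
          have h := checkArr_first 1 a l (r ++ List.replicate m 0) hnol' ha5
          simpa [List.append_assoc] using h
        rw [hsome, if_neg (by omega)]
        have e0 : cntN 0 (l ++ (a + 1) :: r) = cntN 0 (l ++ a :: r) := by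
          simp [cntN_append, cntN_cons, ha5, ha1, hane, hane1] <;> omega
        have e1 : cntN 1 (l ++ (a + 1) :: r) + 1 = cntN 1 (l ++ a :: r) := by
          simp [cntN_append, cntN_cons, ha5, ha1, hane, hane1] <;> omega
        have e2 : cntN 2 (l ++ (a + 1) :: r) = cntN 2 (l ++ a :: r) + 1 := by
          simp [cntN_append, cntN_cons, ha5, ha1, hane, hane1] <;> omega
        have e3 : cntN 3 (l ++ (a + 1) :: r) = cntN 3 (l ++ a :: r) := by
          simp [cntN_append, cntN_cons, ha5, ha1, hane, hane1] <;> omega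
        have e4 : cntN 4 (l ++ (a + 1) :: r) = cntN 4 (l ++ a :: r) := by
          simp [cntN_append, cntN_cons, ha5, ha1, hane, hane1] <;> omega
        have g0 : (↑(cntN 0 (l ++ a :: r)) : Int) = ↑(cntN 0 (l ++ (a + 1) :: r)) := by omega
        have g1 : (↑(cntN 1 (l ++ a :: r)) : Int) - 1 = ↑(cntN 1 (l ++ (a + 1) :: r)) := by omega
        have g2 : (↑(cntN 2 (l ++ a :: r)) : Int) + 1 = ↑(cntN 2 (l ++ (a + 1) :: r)) := by omega
        have g3 : (↑(cntN 3 (l ++ a :: r)) : Int) = ↑(cntN 3 (l ++ (a + 1) :: r)) := by omega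
        have g4 : (↑(cntN 4 (l ++ a :: r)) : Int) = ↑(cntN 4 (l ++ (a + 1) :: r)) := by omega
        have glen : ((l ++ a :: r).length : Int) = ↑(l ++ (a + 1) :: r).length := by simp
        have hpos' : ∀ b ∈ l ++ (a + 1) :: r, 0 < b := by
          intro b hb
          rcases List.mem_append.mp hb with hb | hb
          · exact hpos b (List.mem_append_left _ hb)
          rcases List.mem_cons.mp hb with hb | hb
          · omega
          · exact hpos b (List.mem_append_right _ (List.mem_cons_of_mem _ hb))
        have hW' : 5*(cntN 0 (l ++ (a + 1) :: r) : Int) + (cntN 1 (l ++ (a + 1) :: r))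
            + 2*(cntN 2 (l ++ (a + 1) :: r)) + 3*(cntN 3 (l ++ (a + 1) :: r))
            + 4*(cntN 4 (l ++ (a + 1) :: r)) ≤ t + 1 := by omega
        have hlen' : (t + 1) + ((cs.length : Int)) < 5 * (((l ++ (a + 1) :: r).length : Int) + m) + 5 := by
          simp only [List.length_append, List.length_cons] at hlen ⊢
          push_cast at hlen ⊢
          omega
        rw [g0, g1, g2, g3, g4, glen]
        exact ih (l ++ (a + 1) :: r) m (t + 1) hpos' hW' hlen'
    rw [if_neg hu, if_neg hu]
    by_cases hA : ch = 'a'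
    · rw [if_pos hA, if_pos hA]
      by_cases h2 : cntN 2 p = 0
      · have hno := no_match_of_cnt_zero 2 p hpos h2
        have hnone : checkArr 2 (p ++ List.replicate m 0) = none := by
          apply checkArr_none
          intro b hb
          rcases List.mem_append.mp hb with hb | hb
          · exact hno b hb
          · have := List.eq_of_mem_replicate hb; subst this; norm_num
        rw [hnone, if_pos (by omega)]
      · obtain ⟨l, a, r, hp, hnol, hPa⟩ :=
          exists_first_match (fun b => b % 5 == (2:Int) && b != 0) p (by simpa [cntN] using h2)
        obtain ⟨ha5, hane⟩ : a % 5 = 2 ∧ ¬ a = 0 := by simpa using hPa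
        subst hp
        have hapos : 0 < a := hpos a (by simp)
        have hane1 : ¬ a + 1 = 0 := by omega
        have ha1 : (a + 1) % 5 = 3 := by omega
        have hnol' : ∀ b ∈ l, b % 5 ≠ 2 := by
          intro b hb hbeq
          have hf := hnol b hb
          rw [hbeq] at hf
          simp at hf
          have := hpos b (by simp [hb])
          omega
        have hsome : checkArr 2 ((l ++ a :: r) ++ List.replicate m 0)
            = some ((l ++ (a + 1) :: r) ++ List.replicate m 0) := by
          have h := checkArr_first 2 a l (r ++ List.replicate m 0) hnol' ha5
          simpa [List.append_assoc] using h
        rw [hsome, if_neg (by omega)]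
        have e0 : cntN 0 (l ++ (a + 1) :: r) = cntN 0 (l ++ a :: r) := by
          simp [cntN_append, cntN_cons, ha5, ha1, hane, hane1] <;> omega
        have e1 : cntN 1 (l ++ (a + 1) :: r) = cntN 1 (l ++ a :: r) := by
          simp [cntN_append, cntN_cons, ha5, ha1, hane, hane1] <;> omega
        have e2 : cntN 2 (l ++ (a + 1) :: r) + 1 = cntN 2 (l ++ a :: r) := by
          simp [cntN_append, cntN_cons, ha5, ha1, hane, hane1] <;> omega
        have e3 : cntN 3 (l ++ (a + 1) :: r) = cntN 3 (l ++ a :: r) + 1 := by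
          simp [cntN_append, cntN_cons, ha5, ha1, hane, hane1] <;> omega
        have e4 : cntN 4 (l ++ (a + 1) :: r) = cntN 4 (l ++ a :: r) := by
          simp [cntN_append, cntN_cons, ha5, ha1, hane, hane1] <;> omega
        have g0 : (↑(cntN 0 (l ++ a :: r)) : Int) = ↑(cntN 0 (l ++ (a + 1) :: r)) := by omega
        have g1 : (↑(cntN 1 (l ++ a :: r)) : Int) = ↑(cntN 1 (l ++ (a + 1) :: r)) := by omega
        have g2 : (↑(cntN 2 (l ++ a :: r)) : Int) - 1 = ↑(cntN 2 (l ++ (a + 1) :: r)) := by omega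
        have g3 : (↑(cntN 3 (l ++ a :: r)) : Int) + 1 = ↑(cntN 3 (l ++ (a + 1) :: r)) := by omega
        have g4 : (↑(cntN 4 (l ++ a :: r)) : Int) = ↑(cntN 4 (l ++ (a + 1) :: r)) := by omega
        have glen : ((l ++ a :: r).length : Int) = ↑(l ++ (a + 1) :: r).length := by simp
        have hpos' : ∀ b ∈ l ++ (a + 1) :: r, 0 < b := by
          intro b hb
          rcases List.mem_append.mp hb with hb | hb
          · exact hpos b (List.mem_append_left _ hb)
          rcases List.mem_cons.mp hb with hb | hb
          · omega
          · exact hpos b (List.mem_append_right _ (List.mem_cons_of_mem _ hb))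
        have hW' : 5*(cntN 0 (l ++ (a + 1) :: r) : Int) + (cntN 1 (l ++ (a + 1) :: r))
            + 2*(cntN 2 (l ++ (a + 1) :: r)) + 3*(cntN 3 (l ++ (a + 1) :: r))
            + 4*(cntN 4 (l ++ (a + 1) :: r)) ≤ t + 1 := by omega
        have hlen' : (t + 1) + ((cs.length : Int)) < 5 * (((l ++ (a + 1) :: r).length : Int) + m) + 5 := by
          simp only [List.length_append, List.length_cons] at hlen ⊢
          push_cast at hlen ⊢
          omega
        rw [g0, g1, g2, g3, g4, glen]
        exact ih (l ++ (a + 1) :: r) m (t + 1) hpos' hW' hlen'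
    rw [if_neg hA, if_neg hA]
    by_cases hC : ch = 'c'
    · rw [if_pos hC, if_pos hC]
      by_cases h3 : cntN 3 p = 0
      · have hno := no_match_of_cnt_zero 3 p hpos h3
        have hnone : checkArr 3 (p ++ List.replicate m 0) = none := by
          apply checkArr_none
          intro b hb
          rcases List.mem_append.mp hb with hb | hb
          · exact hno b hb
          · have := List.eq_of_mem_replicate hb; subst this; norm_num
        rw [hnone, if_pos (by omega)]
      · obtain ⟨l, a, r, hp, hnol, hPa⟩ :=
          exists_first_match (fun b => b % 5 == (3:Int) && b != 0) p (by simpa [cntN] using h3)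
        obtain ⟨ha5, hane⟩ : a % 5 = 3 ∧ ¬ a = 0 := by simpa using hPa
        subst hp
        have hapos : 0 < a := hpos a (by simp)
        have hane1 : ¬ a + 1 = 0 := by omega
        have ha1 : (a + 1) % 5 = 4 := by omega
        have hnol' : ∀ b ∈ l, b % 5 ≠ 3 := by
          intro b hb hbeq
          have hf := hnol b hb
          rw [hbeq] at hf
          simp at hf
          have := hpos b (by simp [hb])
          omega
        have hsome : checkArr 3 ((l ++ a :: r) ++ List.replicate m 0)
            = some ((l ++ (a + 1) :: r) ++ List.replicate m 0) := by
          have h := checkArr_first 3 a l (r ++ List.replicate m 0) hnol' ha5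
          simpa [List.append_assoc] using h
        rw [hsome, if_neg (by omega)]
        have e0 : cntN 0 (l ++ (a + 1) :: r) = cntN 0 (l ++ a :: r) := by
          simp [cntN_append, cntN_cons, ha5, ha1, hane, hane1] <;> omega
        have e1 : cntN 1 (l ++ (a + 1) :: r) = cntN 1 (l ++ a :: r) := by
          simp [cntN_append, cntN_cons, ha5, ha1, hane, hane1] <;> omega
        have e2 : cntN 2 (l ++ (a + 1) :: r) = cntN 2 (l ++ a :: r) := by
          simp [cntN_append, cntN_cons, ha5, ha1, hane, hane1] <;> omega
        have e3 : cntN 3 (l ++ (a + 1) :: r) + 1 = cntN 3 (l ++ a :: r) := by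
          simp [cntN_append, cntN_cons, ha5, ha1, hane, hane1] <;> omega
        have e4 : cntN 4 (l ++ (a + 1) :: r) = cntN 4 (l ++ a :: r) + 1 := by
          simp [cntN_append, cntN_cons, ha5, ha1, hane, hane1] <;> omega
        have g0 : (↑(cntN 0 (l ++ a :: r)) : Int) = ↑(cntN 0 (l ++ (a + 1) :: r)) := by omega
        have g1 : (↑(cntN 1 (l ++ a :: r)) : Int) = ↑(cntN 1 (l ++ (a + 1) :: r)) := by omega
        have g2 : (↑(cntN 2 (l ++ a :: r)) : Int) = ↑(cntN 2 (l ++ (a + 1) :: r)) := by omega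
        have g3 : (↑(cntN 3 (l ++ a :: r)) : Int) - 1 = ↑(cntN 3 (l ++ (a + 1) :: r)) := by omega
        have g4 : (↑(cntN 4 (l ++ a :: r)) : Int) + 1 = ↑(cntN 4 (l ++ (a + 1) :: r)) := by omega
        have glen : ((l ++ a :: r).length : Int) = ↑(l ++ (a + 1) :: r).length := by simp
        have hpos' : ∀ b ∈ l ++ (a + 1) :: r, 0 < b := by
          intro b hb
          rcases List.mem_append.mp hb with hb | hb
          · exact hpos b (List.mem_append_left _ hb)
          rcases List.mem_cons.mp hb with hb | hb
          · omega
          · exact hpos b (List.mem_append_right _ (List.mem_cons_of_mem _ hb))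
        have hW' : 5*(cntN 0 (l ++ (a + 1) :: r) : Int) + (cntN 1 (l ++ (a + 1) :: r))
            + 2*(cntN 2 (l ++ (a + 1) :: r)) + 3*(cntN 3 (l ++ (a + 1) :: r))
            + 4*(cntN 4 (l ++ (a + 1) :: r)) ≤ t + 1 := by omega
        have hlen' : (t + 1) + ((cs.length : Int)) < 5 * (((l ++ (a + 1) :: r).length : Int) + m) + 5 := by
          simp only [List.length_append, List.length_cons] at hlen ⊢
          push_cast at hlen ⊢
          omega
        rw [g0, g1, g2, g3, g4, glen]
        exact ih (l ++ (a + 1) :: r) m (t + 1) hpos' hW' hlen'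
    rw [if_neg hC, if_neg hC]
    by_cases hk : ch = 'k'
    · rw [if_pos hk, if_pos hk]
      by_cases h4 : cntN 4 p = 0
      · have hno := no_match_of_cnt_zero 4 p hpos h4
        have hnone : checkArr 4 (p ++ List.replicate m 0) = none := by
          apply checkArr_none
          intro b hb
          rcases List.mem_append.mp hb with hb | hb
          · exact hno b hb
          · have := List.eq_of_mem_replicate hb; subst this; norm_num
        rw [hnone, if_pos (by omega)]
      · obtain ⟨l, a, r, hp, hnol, hPa⟩ :=
          exists_first_match (fun b => b % 5 == (4:Int) && b != 0) p (by simpa [cntN] using h4)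
        obtain ⟨ha5, hane⟩ : a % 5 = 4 ∧ ¬ a = 0 := by simpa using hPa
        subst hp
        have hapos : 0 < a := hpos a (by simp)
        have hane1 : ¬ a + 1 = 0 := by omega
        have ha1 : (a + 1) % 5 = 0 := by omega
        have hnol' : ∀ b ∈ l, b % 5 ≠ 4 := by
          intro b hb hbeq
          have hf := hnol b hb
          rw [hbeq] at hf
          simp at hf
          have := hpos b (by simp [hb])
          omega
        have hsome : checkArr 4 ((l ++ a :: r) ++ List.replicate m 0)
            = some ((l ++ (a + 1) :: r) ++ List.replicate m 0) := by
          have h := checkArr_first 4 a l (r ++ List.replicate m 0) hnol' ha5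
          simpa [List.append_assoc] using h
        rw [hsome, if_neg (by omega)]
        have e0 : cntN 0 (l ++ (a + 1) :: r) = cntN 0 (l ++ a :: r) + 1 := by
          simp [cntN_append, cntN_cons, ha5, ha1, hane, hane1] <;> omega
        have e1 : cntN 1 (l ++ (a + 1) :: r) = cntN 1 (l ++ a :: r) := by
          simp [cntN_append, cntN_cons, ha5, ha1, hane, hane1] <;> omega
        have e2 : cntN 2 (l ++ (a + 1) :: r) = cntN 2 (l ++ a :: r) := by
          simp [cntN_append, cntN_cons, ha5, ha1, hane, hane1] <;> omega
        have e3 : cntN 3 (l ++ (a + 1) :: r) = cntN 3 (l ++ a :: r) := by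
          simp [cntN_append, cntN_cons, ha5, ha1, hane, hane1] <;> omega
        have e4 : cntN 4 (l ++ (a + 1) :: r) + 1 = cntN 4 (l ++ a :: r) := by
          simp [cntN_append, cntN_cons, ha5, ha1, hane, hane1] <;> omega
        have g0 : (↑(cntN 0 (l ++ a :: r)) : Int) + 1 = ↑(cntN 0 (l ++ (a + 1) :: r)) := by omega
        have g1 : (↑(cntN 1 (l ++ a :: r)) : Int) = ↑(cntN 1 (l ++ (a + 1) :: r)) := by omega
        have g2 : (↑(cntN 2 (l ++ a :: r)) : Int) = ↑(cntN 2 (l ++ (a + 1) :: r)) := by omega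
        have g3 : (↑(cntN 3 (l ++ a :: r)) : Int) = ↑(cntN 3 (l ++ (a + 1) :: r)) := by omega
        have g4 : (↑(cntN 4 (l ++ a :: r)) : Int) - 1 = ↑(cntN 4 (l ++ (a + 1) :: r)) := by omega
        have glen : ((l ++ a :: r).length : Int) = ↑(l ++ (a + 1) :: r).length := by simp
        have hpos' : ∀ b ∈ l ++ (a + 1) :: r, 0 < b := by
          intro b hb
          rcases List.mem_append.mp hb with hb | hb
          · exact hpos b (List.mem_append_left _ hb)
          rcases List.mem_cons.mp hb with hb | hb
          · omega
          · exact hpos b (List.mem_append_right _ (List.mem_cons_of_mem _ hb))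
        have hW' : 5*(cntN 0 (l ++ (a + 1) :: r) : Int) + (cntN 1 (l ++ (a + 1) :: r))
            + 2*(cntN 2 (l ++ (a + 1) :: r)) + 3*(cntN 3 (l ++ (a + 1) :: r))
            + 4*(cntN 4 (l ++ (a + 1) :: r)) ≤ t + 1 := by omega
        have hlen' : (t + 1) + ((cs.length : Int)) < 5 * (((l ++ (a + 1) :: r).length : Int) + m) + 5 := by
          simp only [List.length_append, List.length_cons] at hlen ⊢
          push_cast at hlen ⊢
          omega
        rw [g0, g1, g2, g3, g4, glen]
        exact ih (l ++ (a + 1) :: r) m (t + 1) hpos' hW' hlen'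
    rw [if_neg hk, if_neg hk]
    exact ih p m (t + 1) hpos (by omega) (by omega)

theorem solution_eq_runA (S : String) :
    solution S = runA S.toList (List.replicate (S.toList.length / 5) 0) := by
  have hlen : PySem.Str.len S = (S.toList.length : Int) := by simp [pysem]
  have harr : (PySem.List.pyRange 0 (PySem.Int.floordiv (PySem.Str.len S) 5) 1).map (fun _ => (0:Int))
      = List.replicate (S.toList.length / 5) 0 := by
    rw [List.map_const']
    congr 1
    rw [PySem.List.length_pyRange_one, hlen]
    rw [show PySem.Int.floordiv ((S.toList.length : Nat) : Int) 5 = ((S.toList.length / 5 : Nat) : Int) by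
      exact_mod_cast PySem.Int.floordiv_natCast S.toList.length 5]
    omega
  simp only [solution, runA, harr]

-- ===== VERDICT (by name: the statement is the Claim_ definition above) =====
theorem solution_spec : Claim_equal_solution := by
  intro S _
  unfold Spec_solution
  rw [solution_eq_runA]
  have h := bisim S.toList [] (S.toList.length / 5) 0 (by simp)
    (by simp [cntN]) (by push_cast; omega)
  simp only [List.nil_append] at h
  rw [h]
  simp only [show ∀ i : Int, cntN i ([] : List Int) = 0 from fun _ => rfl,
    List.length_nil, Nat.cast_zero]
  rfl
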